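-- pv_equiv track=rewrite | github.com/RyanFleck/Projects | py/codesignal/similarDNA.py | similarDNA
-- ===== SOURCE A (Python) =====
-- def similarDNA(reference, candidates):
--     similarcount = 0
--     refcount = countACTG(reference)
--
--     for candidate in candidates:
--         # First, check if identical.
--         if reference == candidate:
--             similarcount = similarcount + 1
--
--         # Test one filters candidates with more than 3 differences.
--         elif similarACTGCount(refcount, candidate):
--
--             # Test two makes more compute-intensive comparisons.
--             if attemptSubstitutions(reference, candidate):
--                 similarcount = similarcount + 1
--
--     return similarcount
--
-- def attemptSubstitutions(reference, candidate):
--     # Second test, checks order of ATCGs.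
--
--     rotated = reference
--     for x in range(len(reference)):
--         rotated = rotated[-1] + rotated[:-1]
--         similarities = stringSimilarities(rotated, candidate)
--         if similarities + 3 >= len(reference):
--             return True
--
--     return False
--
-- def stringSimilarities(a, b):
--     if len(a) != len(b):
--         return 0
--
--     if a == b:
--         return len(a)
--
--     similarities = 0
--     for x in range(len(a)):
--         if a[x] == b[x]:
--             similarities = similarities + 1
--
--     return similarities
--
-- def similarACTGCount(refcount, candidate):
--     # First test, counts ATCG and ensures there are fewer than three deviations
--     cancount = countACTG(candidate)
--     totaldiff = 0
--     for indice in range(4):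
--         diff = refcount[indice] - cancount[indice]
--         totaldiff = totaldiff + abs(diff)
--
--     # Totaldiff of 6 indicates 3 deviant characters.
--     if totaldiff < 7:
--         return True
--
--     return False
--
-- def countACTG(seq):
--     A = seq.count('A')
--     C = seq.count('C')
--     T = seq.count('T')
--     G = seq.count('G')
--     return [A, C, T, G]
-- ===== SOURCE B (Python) =====
-- def similarDNA(reference, candidates):
--     # Per candidate: one pass building a shift->match-count table instead of
--     # n rotate-and-compare scans; 'best' is the best cyclic alignment (strings
--     # of a different length align at 0 positions, as in A's comparison).
--     n = len(reference)
--     bases = 'ACTG'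
--     refcount = [reference.count(b) for b in bases]
--     pos = {}
--     for j, ch in enumerate(reference):
--         pos.setdefault(ch, []).append(j)
--     total = 0
--     for candidate in candidates:
--         if candidate == reference:
--             total += 1
--             continue
--         if sum(abs(rc - candidate.count(b)) for rc, b in zip(refcount, bases)) >= 7:
--             continue
--         if n == 0:
--             continue
--         shifts = [(i - j) % n for i, ch in enumerate(candidate) for j in pos.get(ch, ())] if len(candidate) == n else []
--         cnt = {}
--         for s in shifts:
--             cnt[s] = cnt.get(s, 0) + 1
--         best = max(cnt.values()) if cnt else 0
--         if best + 3 >= n: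
--             total += 1
--     return total
-- ===== Notes on version B (the rewrite author's own statement) =====
-- stated objective: faster
-- what changed: Replaces A's per-candidate loop of n rotate-and-compare passes (rebuilding the rotated string and rescanning it each time) by a single pass per candidate that tallies a shift->match-count table from a precomputed position index of the reference and tests the best alignment, answering all cyclic shifts at once.
import Mathlib
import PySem

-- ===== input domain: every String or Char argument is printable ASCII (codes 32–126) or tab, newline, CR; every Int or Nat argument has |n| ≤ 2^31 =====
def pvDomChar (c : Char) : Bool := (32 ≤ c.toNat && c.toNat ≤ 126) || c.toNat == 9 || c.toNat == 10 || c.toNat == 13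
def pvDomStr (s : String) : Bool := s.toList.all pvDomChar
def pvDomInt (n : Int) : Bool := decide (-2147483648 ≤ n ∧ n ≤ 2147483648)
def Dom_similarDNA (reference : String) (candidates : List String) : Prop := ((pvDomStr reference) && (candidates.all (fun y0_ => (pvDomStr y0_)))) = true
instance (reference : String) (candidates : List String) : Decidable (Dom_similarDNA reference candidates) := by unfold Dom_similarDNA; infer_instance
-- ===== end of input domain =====

-- B replaces A's n rotate-and-compare passes per candidate by one pass that tallies,
-- for every cyclic shift at once, how many positions agree (a shift->match-count table)
-- and tests the best alignment (different lengths align at 0 positions, as in A).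

-- ===== PORT A =====
-- str.count('A') for a single character is the character count
def countACTG (seq : List Char) : List Int :=
  [(seq.count 'A' : Int), (seq.count 'C' : Int), (seq.count 'T' : Int), (seq.count 'G' : Int)]

def stringSimilarities (a b : List Char) : Int :=
  if a.length ≠ b.length then 0
  else if a = b then (a.length : Int)
  else (PySem.List.pyRange 0 a.length 1).foldl
    (fun similarities x =>
      if PySem.List.pyGetD a x ' ' = PySem.List.pyGetD b x ' ' then similarities + 1
      else similarities) 0

def similarACTGCount (refcount : List Int) (candidate : List Char) : Bool :=
  let cancount := countACTG candidate
  let totaldiff := (PySem.List.pyRange 0 4 1).foldl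
    (fun totaldiff indice =>
      totaldiff + |PySem.List.pyGetD refcount indice 0 - PySem.List.pyGetD cancount indice 0|) 0
  decide (totaldiff < 7)

-- rotated = rotated[-1] + rotated[:-1]; rotated[-1] is always in range here (the
-- loop only runs when the reference is nonempty), so the total pyGetD form is exact
def rotOnce (rotated : List Char) : List Char :=
  PySem.List.pyGetD rotated (-1) ' ' :: PySem.List.slice rotated none (some (-1))

def attemptLoop (reference candidate : List Char) : List Int → List Char → Bool
  | [], _ => false
  | _ :: rest, rotated =>
    let rotated' := rotOnce rotated
    if stringSimilarities rotated' candidate + 3 ≥ (reference.length : Int) then true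
    else attemptLoop reference candidate rest rotated'

def attemptSubstitutions (reference candidate : List Char) : Bool :=
  attemptLoop reference candidate (PySem.List.pyRange 0 reference.length 1) reference

def similarDNA (reference : String) (candidates : List String) : Int :=
  let refcount := countACTG reference.toList
  candidates.foldl
    (fun similarcount candidate =>
      if reference.toList = candidate.toList then similarcount + 1
      else if similarACTGCount refcount candidate.toList then
        if attemptSubstitutions reference.toList candidate.toList then similarcount + 1
        else similarcount
      else similarcount) 0

-- ===== PORT B =====
-- pos.setdefault(ch, []).append(j) over enumerate(reference)
def posTable (r : List Char) : PySem.Dict Char (List Int) :=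
  (PySem.List.enumerate r 0).foldl (fun d p => d.modify p.2 [] (· ++ [p.1])) PySem.Dict.empty

-- [(i - j) % n for i, ch in enumerate(candidate) for j in pos.get(ch, ())]
def shiftList (pos : PySem.Dict Char (List Int)) (n : Int) (c : List Char) : List Int :=
  (PySem.List.enumerate c 0).flatMap
    (fun p => (pos.getD p.2 []).map (fun j => PySem.Int.mod (p.1 - j) n))

def similarDNA_alt (reference : String) (candidates : List String) : Int :=
  let r := reference.toList
  let n := r.length
  let refcount := [(r.count 'A' : Int), (r.count 'C' : Int), (r.count 'T' : Int), (r.count 'G' : Int)]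
  let pos := posTable r
  candidates.foldl
    (fun total candidate =>
      let c := candidate.toList
      if c = r then total + 1
      else if ((refcount.zip ['A', 'C', 'T', 'G']).map
          (fun p => |p.1 - (c.count p.2 : Int)|)).sum ≥ 7 then total
      else if n = 0 then total
      else
        let shifts := if c.length = n then shiftList pos (n : Int) c else []
        let cnt := PySem.Dict.counter shifts
        let best : Int := if cnt.size ≠ 0 then (PySem.List.max? cnt.values (fun y => y)).getD 0 else 0
        if best + 3 ≥ (n : Int) then total + 1
        else total) 0

-- ===== PRECONDITION & SPEC =====
def Spec_similarDNA (reference : String) (candidates : List String) (out : Int) : Prop :=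
  out = similarDNA_alt reference candidates
instance (reference : String) (candidates : List String) (out : Int) : Decidable (Spec_similarDNA reference candidates out) := by unfold Spec_similarDNA; infer_instance

-- ===== CLAIM (what is proved, stated in full; the proofs are below) =====
def Claim_equal_similarDNA : Prop := ∀ (reference : String) (candidates : List String), Dom_similarDNA reference candidates → Spec_similarDNA reference candidates (similarDNA reference candidates)

-- ===== LEMMAS AND PROOFS =====

-- proof-side abbreviation for the ACTG-count gap both filters compute
def pvGapACTG (r c : List Char) : Int :=
  |(r.count 'A' : Int) - (c.count 'A' : Int)| + |(r.count 'C' : Int) - (c.count 'C' : Int)|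
    + |(r.count 'T' : Int) - (c.count 'T' : Int)| + |(r.count 'G' : Int) - (c.count 'G' : Int)|

-- per-candidate contribution of A's loop body
def indA (r c : List Char) : Int :=
  if r = c then 1
  else if similarACTGCount (countACTG r) c then
    if attemptSubstitutions r c then 1 else 0
  else 0

-- per-candidate contribution of B's loop body
def indB (r c : List Char) : Int :=
  if c = r then 1
  else if (([(r.count 'A' : Int), (r.count 'C' : Int), (r.count 'T' : Int), (r.count 'G' : Int)].zip
      ['A', 'C', 'T', 'G']).map (fun p => |p.1 - (c.count p.2 : Int)|)).sum ≥ 7 then 0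
  else if r.length = 0 then 0
  else if (if (PySem.Dict.counter (if c.length = r.length then shiftList (posTable r) (r.length : Int) c else [])).size ≠ 0 then
        (PySem.List.max? (PySem.Dict.counter (if c.length = r.length then shiftList (posTable r) (r.length : Int) c else [])).values (fun y => y)).getD 0
      else 0) + 3 ≥ (r.length : Int) then 1
  else 0

-- number of positions where the reference rotated right by s agrees with c
def matchCnt (r c : List Char) (s : Nat) : Nat :=
  List.countP (fun i => r.getD ((i + s * (r.length - 1)) % r.length) ' ' == c.getD i ' ')
    (List.range c.length)

theorem foldl_indA (r : List Char) (cs : List String) (acc : Int) :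
    cs.foldl
      (fun similarcount candidate =>
        if r = candidate.toList then similarcount + 1
        else if similarACTGCount (countACTG r) candidate.toList then
          if attemptSubstitutions r candidate.toList then similarcount + 1
          else similarcount
        else similarcount) acc
    = acc + (cs.map (fun candidate => indA r candidate.toList)).sum := by
  induction cs generalizing acc with
  | nil => simp
  | cons c cs ih =>
    simp only [List.foldl_cons, List.map_cons, List.sum_cons, ih, indA]
    split_ifs <;> ring

theorem foldl_indB (r : List Char) (cs : List String) (acc : Int) :
    cs.foldl
      (fun total candidate =>
        let c := candidate.toList
        if c = r then total + 1
        else if (([(r.count 'A' : Int), (r.count 'C' : Int), (r.count 'T' : Int), (r.count 'G' : Int)].zip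
            ['A', 'C', 'T', 'G']).map (fun p => |p.1 - (c.count p.2 : Int)|)).sum ≥ 7 then total
        else if r.length = 0 then total
        else
          let shifts := if c.length = r.length then shiftList (posTable r) (r.length : Int) c else []
          let cnt := PySem.Dict.counter shifts
          let best : Int := if cnt.size ≠ 0 then (PySem.List.max? cnt.values (fun y => y)).getD 0 else 0
          if best + 3 ≥ (r.length : Int) then total + 1
          else total) acc
    = acc + (cs.map (fun candidate => indB r candidate.toList)).sum := by
  induction cs generalizing acc with
  | nil => simp
  | cons c cs ih =>
    simp only [List.foldl_cons, List.map_cons, List.sum_cons, ih, indB]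
    split_ifs <;> ring

theorem similarDNA_eq_sum (reference : String) (candidates : List String) :
    similarDNA reference candidates
      = (candidates.map (fun c => indA reference.toList c.toList)).sum := by
  unfold similarDNA
  exact (foldl_indA reference.toList candidates 0).trans (by rw [zero_add])

theorem similarDNA_alt_eq_sum (reference : String) (candidates : List String) :
    similarDNA_alt reference candidates
      = (candidates.map (fun c => indB reference.toList c.toList)).sum := by
  unfold similarDNA_alt
  exact (foldl_indB reference.toList candidates 0).trans (by rw [zero_add])

-- A's count filter equals the gap test
theorem pyGetD4_zero (x1 x2 x3 x4 : Int) : PySem.List.pyGetD [x1, x2, x3, x4] 0 0 = x1 := rfl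
theorem pyGetD4_one (x1 x2 x3 x4 : Int) : PySem.List.pyGetD [x1, x2, x3, x4] 1 0 = x2 := rfl
theorem pyGetD4_two (x1 x2 x3 x4 : Int) : PySem.List.pyGetD [x1, x2, x3, x4] 2 0 = x3 := rfl
theorem pyGetD4_three (x1 x2 x3 x4 : Int) : PySem.List.pyGetD [x1, x2, x3, x4] 3 0 = x4 := rfl

theorem similarACTGCount_eq (r c : List Char) :
    similarACTGCount (countACTG r) c = decide (pvGapACTG r c < 7) := by
  have hrange : PySem.List.pyRange 0 4 1 = [0, 1, 2, 3] := by decide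
  simp only [similarACTGCount, countACTG, hrange, List.foldl_cons, List.foldl_nil,
    pyGetD4_zero, pyGetD4_one, pyGetD4_two, pyGetD4_three]
  rw [decide_eq_decide]
  unfold pvGapACTG
  constructor <;> intro h <;> linarith

-- B's zipped filter sum equals the gap
theorem zipsum_eq (r c : List Char) :
    (([(r.count 'A' : Int), (r.count 'C' : Int), (r.count 'T' : Int), (r.count 'G' : Int)].zip
      ['A', 'C', 'T', 'G']).map (fun p => |p.1 - (c.count p.2 : Int)|)).sum = pvGapACTG r c := by
  simp only [List.zip_cons_cons, List.zip_nil_left, List.map_cons, List.map_nil,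
    List.sum_cons, List.sum_nil, pvGapACTG]
  ring

theorem rotOnce_eq (xs : List Char) (h : xs ≠ []) :
    rotOnce xs = xs.getLast h :: xs.dropLast := by
  unfold rotOnce
  rw [PySem.List.pyGetD_neg_one xs ' ' h, PySem.List.slice_to_neg_one]

theorem rotOnce_length (xs : List Char) (h : xs ≠ []) :
    (rotOnce xs).length = xs.length := by
  cases xs with
  | nil => exact absurd rfl h
  | cons a l => rw [rotOnce_eq _ h]; simp

theorem rotOnce_getD (xs : List Char) (h : xs ≠ []) (i : Nat) (hi : i < xs.length) (d : Char) :
    (rotOnce xs).getD i d = xs.getD ((i + (xs.length - 1)) % xs.length) d := by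
  have hn : 0 < xs.length := List.length_pos_of_ne_nil h
  rw [rotOnce_eq xs h]
  cases i with
  | zero =>
    rw [List.getD_cons_zero]
    have h1 : (0 + (xs.length - 1)) % xs.length = xs.length - 1 := by
      rw [Nat.zero_add, Nat.mod_eq_of_lt (by omega)]
    rw [h1, List.getD_eq_getElem _ _ (by omega), List.getLast_eq_getElem]
  | succ j =>
    rw [List.getD_cons_succ]
    have hj : j < xs.dropLast.length := by
      rw [List.length_dropLast]; omega
    rw [List.getD_eq_getElem _ _ hj, List.getElem_dropLast]
    have h2 : (j + 1 + (xs.length - 1)) % xs.length = j := by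
      have he : j + 1 + (xs.length - 1) = j + xs.length := by omega
      rw [he, Nat.add_mod_right, Nat.mod_eq_of_lt (by omega)]
    rw [h2, List.getD_eq_getElem _ _ (by omega)]

theorem iterate_rotOnce_length (xs : List Char) (h : xs ≠ []) (k : Nat) :
    (rotOnce^[k] xs).length = xs.length := by
  induction k with
  | zero => rfl
  | succ k ih =>
    have hpos : 0 < xs.length := List.length_pos_of_ne_nil h
    rw [Function.iterate_succ_apply',
      rotOnce_length _ (List.ne_nil_of_length_pos (by rw [ih]; exact hpos)), ih]

theorem iterate_rotOnce_getD (xs : List Char) (h : xs ≠ []) (k : Nat) (i : Nat)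
    (hi : i < xs.length) (d : Char) :
    (rotOnce^[k] xs).getD i d = xs.getD ((i + k * (xs.length - 1)) % xs.length) d := by
  induction k generalizing i hi with
  | zero => simp [Nat.mod_eq_of_lt hi]
  | succ k ih =>
    have hpos : 0 < xs.length := List.length_pos_of_ne_nil h
    have hlen : (rotOnce^[k] xs).length = xs.length := iterate_rotOnce_length xs h k
    have hne : rotOnce^[k] xs ≠ [] := List.ne_nil_of_length_pos (by rw [hlen]; exact hpos)
    rw [Function.iterate_succ_apply', rotOnce_getD _ hne i (by rw [hlen]; exact hi) d, hlen,
      ih ((i + (xs.length - 1)) % xs.length) (Nat.mod_lt _ hpos)]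
    congr 1
    have hmm : ((i + (xs.length - 1)) % xs.length + k * (xs.length - 1)) % xs.length
        = ((i + (xs.length - 1)) + k * (xs.length - 1)) % xs.length :=
      Nat.ModEq.add_right _ (Nat.mod_modEq _ _)
    rw [hmm]
    congr 1
    ring

theorem stringSimilarities_eq_countP (a b : List Char) (h : a.length = b.length) :
    stringSimilarities a b
      = (List.countP (fun x => a.getD x ' ' == b.getD x ' ') (List.range b.length) : Int) := by
  unfold stringSimilarities
  rw [if_neg (not_ne_iff.mpr h)]
  by_cases hab : a = b
  · rw [if_pos hab]
    subst hab
    rw [List.countP_eq_length.mpr (by intro x hx; simp), List.length_range, h]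
  · rw [if_neg hab, PySem.List.foldl_ite_add_one, zero_add,
      PySem.List.pyRange_zero_natCast, List.countP_map]
    norm_cast
    rw [h]
    exact List.countP_congr (by intro x hx; simp [Function.comp, PySem.List.pyGetD_natCast])

theorem stringSimilarities_rot (r c : List Char) (hr : r ≠ []) (hc : c.length = r.length) (k : Nat) :
    stringSimilarities (rotOnce^[k] r) c = (matchCnt r c k : Int) := by
  have hlen : (rotOnce^[k] r).length = r.length := iterate_rotOnce_length r hr k
  rw [stringSimilarities_eq_countP _ _ (by rw [hlen, hc])]
  unfold matchCnt
  congr 1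
  refine List.countP_congr ?_
  intro x hx
  have hx' : x < r.length := by rw [← hc]; exact List.mem_range.mp hx
  rw [iterate_rotOnce_getD r hr k x hx' ' ']

theorem matchCnt_mod (r c : List Char) (_hr : r ≠ []) (k : Nat) :
    matchCnt r c k = matchCnt r c (k % r.length) := by
  unfold matchCnt
  refine List.countP_congr ?_
  intro x hx
  have h1 : x + k * (r.length - 1) ≡ x + (k % r.length) * (r.length - 1) [MOD r.length] :=
    Nat.ModEq.add_left _ (Nat.ModEq.mul_right _ (Nat.mod_modEq k r.length).symm)
  have h2 : (x + k * (r.length - 1)) % r.length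
      = (x + (k % r.length) * (r.length - 1)) % r.length := h1
  rw [h2]

theorem attemptLoop_iff (r c : List Char) (_hn : 0 < r.length) (fuel : List Int) (k : Nat) :
    attemptLoop r c fuel (rotOnce^[k] r) = true
      ↔ ∃ m < fuel.length, stringSimilarities (rotOnce^[k + m + 1] r) c + 3 ≥ (r.length : Int) := by
  induction fuel generalizing k with
  | nil => simp [attemptLoop]
  | cons x rest ih =>
    rw [show attemptLoop r c (x :: rest) (rotOnce^[k] r)
        = (if stringSimilarities (rotOnce (rotOnce^[k] r)) c + 3 ≥ (r.length : Int) then true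
           else attemptLoop r c rest (rotOnce (rotOnce^[k] r))) from rfl,
      show rotOnce (rotOnce^[k] r) = rotOnce^[k + 1] r from
        (Function.iterate_succ_apply' rotOnce k r).symm]
    by_cases htest : stringSimilarities (rotOnce^[k + 1] r) c + 3 ≥ (r.length : Int)
    · rw [if_pos htest]
      simp only [List.length_cons]
      constructor
      · intro _
        exact ⟨0, by omega, by simpa using htest⟩
      · intro _; trivial
    · rw [if_neg htest, ih (k + 1)]
      simp only [List.length_cons]
      constructor
      · rintro ⟨m, hm, hP⟩
        refine ⟨m + 1, by omega, ?_⟩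
        have he : k + (m + 1) + 1 = k + 1 + m + 1 := by omega
        rw [he]; exact hP
      · rintro ⟨m, hm, hP⟩
        cases m with
        | zero => exact absurd (by simpa using hP) htest
        | succ m' =>
          refine ⟨m', by omega, ?_⟩
          have he : k + 1 + m' + 1 = k + (m' + 1) + 1 := by omega
          rw [he]; exact hP

theorem attemptSubstitutions_iff (r c : List Char) (hn : 0 < r.length) :
    attemptSubstitutions r c = true
      ↔ ∃ m < r.length, stringSimilarities (rotOnce^[m + 1] r) c + 3 ≥ (r.length : Int) := by
  unfold attemptSubstitutions
  have hlen : (PySem.List.pyRange 0 (r.length : Int) 1).length = r.length := by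
    rw [PySem.List.pyRange_zero_natCast]; simp
  have h0 := attemptLoop_iff r c hn (PySem.List.pyRange 0 (r.length : Int) 1) 0
  rw [show rotOnce^[0] r = r from rfl] at h0
  rw [h0, hlen]
  constructor <;> (rintro ⟨m, hm, hP⟩; exact ⟨m, hm, by simpa using hP⟩)

-- the position table read back
theorem posTable_getD (r : List Char) (ch : Char) :
    (posTable r).getD ch []
      = ((PySem.List.enumerate r 0).filter (fun p => p.2 == ch)).map (fun p => p.1) := by
  unfold posTable
  have hswap :
      (PySem.List.enumerate r 0).foldl (fun d p => d.modify p.2 [] (· ++ [p.1]))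
          (PySem.Dict.empty : PySem.Dict Char (List Int))
        = ((PySem.List.enumerate r 0).map (fun p => (p.2, p.1))).foldl
            (fun d p => d.modify p.1 [] (· ++ [p.2])) PySem.Dict.empty :=
    Eq.symm List.foldl_map
  rw [hswap, PySem.Dict.getD_foldl_modify_append, PySem.Dict.getD_empty, List.nil_append,
    List.filter_map, List.map_map]
  simp only [Function.comp_def]

theorem mem_posTable (r : List Char) (ch : Char) (j : Int) :
    j ∈ (posTable r).getD ch []
      ↔ ∃ jj : Nat, ∃ hj : jj < r.length, j = (jj : Int) ∧ r[jj] = ch := by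
  rw [posTable_getD]
  simp only [List.mem_map, List.mem_filter, PySem.List.mem_enumerate_iff]
  constructor
  · rintro ⟨p, ⟨⟨kk, hk, rfl⟩, hbeq⟩, rfl⟩
    exact ⟨kk, hk, by simp, by simpa using hbeq⟩
  · rintro ⟨jj, hj, rfl, hch⟩
    exact ⟨(0 + (jj : Int), r[jj]), ⟨⟨jj, hj, rfl⟩, by simpa using hch⟩, by simp⟩

theorem nodup_posTable (r : List Char) (ch : Char) :
    ((posTable r).getD ch []).Nodup := by
  rw [posTable_getD]
  exact ((PySem.List.pairwise_lt_enumerate r 0).filter _).map _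
    (fun a b hab => ne_of_lt hab)

-- the unique aligning position for shift s at position i
theorem mod_shift_iff (n : Nat) (hn : 0 < n) (i jj : Nat) (hjj : jj < n) (s : Int)
    (hs : 0 ≤ s) (hsn : s < (n : Int)) :
    PySem.Int.mod ((i : Int) - (jj : Int)) (n : Int) = s
      ↔ jj = (i + s.toNat * (n - 1)) % n := by
  have hn' : (0 : Int) < (n : Int) := by exact_mod_cast hn
  have hst : ((s.toNat : Nat) : Int) = s := Int.toNat_of_nonneg hs
  have hsmod : (s : Int) % (n : Int) = s := Int.emod_eq_of_lt hs hsn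
  rw [PySem.Int.mod_eq_emod_of_pos hn']
  have hcast : ((i + s.toNat * (n - 1) : Nat) : Int)
      = (i : Int) + (s.toNat : Int) * ((n : Int) - 1) := by
    push_cast [Nat.cast_sub hn]
    ring
  have hL : (((i : Int) - jj) % (n : Int) = s) ↔ (n : Int) ∣ ((i : Int) - jj - s) := by
    constructor
    · intro h
      exact Int.dvd_of_emod_eq_zero (Int.emod_eq_emod_iff_emod_sub_eq_zero.mp (by rw [h, hsmod]))
    · intro h
      have h2 := Int.emod_eq_emod_iff_emod_sub_eq_zero.mpr (Int.emod_eq_zero_of_dvd h)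
      rw [hsmod] at h2
      exact h2
  have hR : (jj = (i + s.toNat * (n - 1)) % n)
      ↔ (n : Int) ∣ ((i : Int) + (s.toNat : Int) * ((n : Int) - 1) - jj) := by
    constructor
    · intro h
      have hmodeq : jj ≡ i + s.toNat * (n - 1) [MOD n] := by
        show jj % n = (i + s.toNat * (n - 1)) % n
        rw [Nat.mod_eq_of_lt hjj, h]
      have hd := Nat.modEq_iff_dvd.mp hmodeq
      rw [hcast] at hd
      exact hd
    · intro h
      have hmodeq : jj ≡ i + s.toNat * (n - 1) [MOD n] :=
        Nat.modEq_iff_dvd.mpr (by rw [hcast]; exact h)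
      have h2 : jj % n = (i + s.toNat * (n - 1)) % n := hmodeq
      rw [Nat.mod_eq_of_lt hjj] at h2
      exact h2
  rw [hL, hR]
  have key : (i : Int) + (s.toNat : Int) * ((n : Int) - 1) - jj
      = ((i : Int) - jj - s) + (s.toNat : Int) * n := by
    rw [hst]
    ring
  rw [key]
  constructor
  · intro h
    exact dvd_add h (dvd_mul_left _ _)
  · intro h
    have h2 := dvd_sub h (dvd_mul_left ((n : Int)) ((s.toNat : Int)))
    simpa using h2

theorem count_inner (r : List Char) (n : Nat) (hn : 0 < n) (hr : r.length = n)
    (i : Nat) (ch : Char) (s : Int) (hs : 0 ≤ s) (hsn : s < (n : Int)) :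
    (((posTable r).getD ch []).map (fun j => PySem.Int.mod ((i : Int) - j) (n : Int))).count s
      = if r.getD ((i + s.toNat * (n - 1)) % n) ' ' == ch then 1 else 0 := by
  have hj0 : (i + s.toNat * (n - 1)) % n < n := Nat.mod_lt _ hn
  rw [List.count_eq_countP, List.countP_map]
  have hcongr : List.countP ((fun x => x == s) ∘ (fun j => PySem.Int.mod ((i : Int) - j) (n : Int)))
        ((posTable r).getD ch [])
      = List.countP (fun j => j == (((i + s.toNat * (n - 1)) % n : Nat) : Int))
        ((posTable r).getD ch []) := by
    refine List.countP_congr ?_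
    intro j hjmem
    obtain ⟨jj, hjlt, rfl, hjch⟩ := (mem_posTable r ch j).mp hjmem
    simp only [Function.comp, beq_iff_eq]
    rw [mod_shift_iff n hn i jj (by rw [← hr]; exact hjlt) s hs hsn]
    exact ⟨fun h => by exact_mod_cast h, fun h => by exact_mod_cast h⟩
  rw [hcongr, ← List.count_eq_countP]
  by_cases hch : r.getD ((i + s.toNat * (n - 1)) % n) ' ' = ch
  · rw [if_pos (by simpa using hch)]
    refine List.count_eq_one_of_mem (nodup_posTable r ch) ?_
    refine (mem_posTable r ch _).mpr ⟨(i + s.toNat * (n - 1)) % n, by omega, rfl, ?_⟩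
    rw [← hch, List.getD_eq_getElem _ _ (by omega)]
  · rw [if_neg (by simpa using hch)]
    refine List.count_eq_zero.mpr ?_
    intro hmem
    obtain ⟨jj, hjlt, hcast, hjch⟩ := (mem_posTable r ch _).mp hmem
    have hjj : (i + s.toNat * (n - 1)) % n = jj := by exact_mod_cast hcast
    apply hch
    rw [hjj, List.getD_eq_getElem _ _ (by omega)]
    exact hjch

theorem sum_map_ite_one_zero_nat {α : Type} (p : α → Bool) (xs : List α) :
    (xs.map (fun x => if p x then 1 else 0)).sum = xs.countP p := by
  induction xs with
  | nil => rfl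
  | cons a l ih =>
    simp only [List.map_cons, List.sum_cons, List.countP_cons, ih]
    split <;> omega

theorem count_shiftList (r c : List Char) (n : Nat) (hn : 0 < n) (hr : r.length = n)
    (_hc : c.length = n) (s : Int) (hs : 0 ≤ s) (hsn : s < (n : Int)) :
    (shiftList (posTable r) (n : Int) c).count s = matchCnt r c s.toNat := by
  unfold shiftList
  rw [List.count_flatMap, PySem.List.enumerate_eq_map_pyRange c ' ', PySem.List.len_eq,
    PySem.List.pyRange_zero_natCast, List.map_map, List.map_map]
  have hmap : List.map (((List.count s ∘ fun p => ((posTable r).getD p.2 []).map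
        (fun j => PySem.Int.mod (p.1 - j) (n : Int))) ∘
        (fun j => (j, PySem.List.pyGetD c j ' '))) ∘ fun k => ((k : Nat) : Int))
        (List.range c.length)
      = List.map (fun k => if r.getD ((k + s.toNat * (n - 1)) % n) ' ' == c.getD k ' '
          then 1 else 0) (List.range c.length) := by
    refine List.map_congr_left ?_
    intro k hk
    simp only [Function.comp, PySem.List.pyGetD_natCast]
    exact count_inner r n hn hr k (c.getD k ' ') s hs hsn
  rw [hmap, sum_map_ite_one_zero_nat]
  unfold matchCnt
  rw [hr]

theorem exists_bridge (n : Nat) (hn : 0 < n) (P : Nat → Prop) :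
    (∃ m < n, P ((m + 1) % n)) ↔ ∃ s < n, P s := by
  constructor
  · rintro ⟨m, hm, hP⟩
    exact ⟨(m + 1) % n, Nat.mod_lt _ hn, hP⟩
  · rintro ⟨s, hsn, hP⟩
    by_cases hs0 : s = 0
    · subst hs0
      refine ⟨n - 1, by omega, ?_⟩
      have he : (n - 1 + 1) % n = 0 := by
        rw [show n - 1 + 1 = n from by omega, Nat.mod_self]
      rw [he]; exact hP
    · refine ⟨s - 1, by omega, ?_⟩
      have he : (s - 1 + 1) % n = s := by
        rw [show s - 1 + 1 = s from by omega, Nat.mod_eq_of_lt hsn]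
      rw [he]; exact hP

theorem simil_ne_len (r c : List Char) (hr : r ≠ []) (hlen : c.length ≠ r.length) (k : Nat) :
    stringSimilarities (rotOnce^[k] r) c = 0 := by
  unfold stringSimilarities
  rw [if_pos (by rw [iterate_rotOnce_length r hr k]; exact fun h => hlen h.symm)]

theorem mem_shiftList_range (r c : List Char) (hn : 0 < r.length) (x : Int)
    (hx : x ∈ shiftList (posTable r) (r.length : Int) c) : 0 ≤ x ∧ x < (r.length : Int) := by
  unfold shiftList at hx
  simp only [List.mem_flatMap, List.mem_map] at hx
  obtain ⟨p, -, j, -, rfl⟩ := hx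
  have hn' : (0 : Int) < (r.length : Int) := by exact_mod_cast hn
  rw [PySem.Int.mod_eq_emod_of_pos hn']
  exact ⟨Int.emod_nonneg _ (by omega), Int.emod_lt_of_pos _ hn'⟩

theorem mem_values_counter (xs : List Int) (v : Int) :
    v ∈ (PySem.Dict.counter xs).values ↔ ∃ k ∈ xs, v = (xs.count k : Int) := by
  rw [PySem.Dict.values_eq_map_keys _ (PySem.Dict.nodup_keys_counter xs) 0,
    PySem.Dict.keys_counter]
  simp only [List.mem_map]
  constructor
  · rintro ⟨k, hk, rfl⟩
    exact ⟨k, (PySem.Set.mem_ofList _ _).mp hk, by rw [PySem.Dict.getD_counter]⟩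
  · rintro ⟨k, hk, rfl⟩
    exact ⟨k, (PySem.Set.mem_ofList _ _).mpr hk, by rw [PySem.Dict.getD_counter]⟩

theorem counter_size_ne_zero (xs : List Int) (hx : xs ≠ []) :
    (PySem.Dict.counter xs).size ≠ 0 := by
  obtain ⟨y, hy⟩ := List.exists_mem_of_ne_nil xs hx
  have hk : y ∈ (PySem.Dict.counter xs).keys := by
    rw [PySem.Dict.keys_counter]
    exact (PySem.Set.mem_ofList _ _).mpr hy
  have hne : (PySem.Dict.counter xs).keys ≠ [] := List.ne_nil_of_mem hk
  simp only [PySem.Dict.keys] at hne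
  simp only [PySem.Dict.size]
  intro h0
  exact hne (by rw [List.eq_nil_of_length_eq_zero h0]; rfl)

-- the best tallied alignment decides A's rotation test
theorem best_iff (r c : List Char) (hn : 0 < r.length) (hc : c.length = r.length) :
    ((if (PySem.Dict.counter (shiftList (posTable r) (r.length : Int) c)).size ≠ 0 then
        (PySem.List.max? (PySem.Dict.counter (shiftList (posTable r) (r.length : Int) c)).values (fun y => y)).getD 0
      else 0) + 3 ≥ (r.length : Int))
      ↔ ∃ s < r.length, (matchCnt r c s : Int) + 3 ≥ (r.length : Int) := by
  have hcount : ∀ sN : Nat, sN < r.length →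
      ((shiftList (posTable r) (r.length : Int) c).count ((sN : Nat) : Int)) = matchCnt r c sN := by
    intro sN hsN
    rw [count_shiftList r c r.length hn rfl hc (sN : Int) (by positivity) (by exact_mod_cast hsN),
      Int.toNat_natCast]
  by_cases hemp : shiftList (posTable r) (r.length : Int) c = []
  · have hsz : ¬ ((PySem.Dict.counter (shiftList (posTable r) (r.length : Int) c)).size ≠ 0) := by
      rw [hemp]; decide
    rw [if_neg hsz]
    constructor
    · intro h
      refine ⟨0, hn, ?_⟩
      have h0 : (0 : Int) ≤ (matchCnt r c 0 : Int) := by positivity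
      omega
    · rintro ⟨sN, hsN, hP⟩
      have hc0 := hcount sN hsN
      rw [hemp, List.count_nil] at hc0
      omega
  · have hsz : (PySem.Dict.counter (shiftList (posTable r) (r.length : Int) c)).size ≠ 0 :=
      counter_size_ne_zero _ hemp
    rw [if_pos hsz]
    obtain ⟨y, hy⟩ := List.exists_mem_of_ne_nil _ hemp
    have hyv : (((shiftList (posTable r) (r.length : Int) c).count y : Nat) : Int)
        ∈ (PySem.Dict.counter (shiftList (posTable r) (r.length : Int) c)).values :=
      (mem_values_counter _ _).mpr ⟨y, hy, rfl⟩
    have hvne : (PySem.Dict.counter (shiftList (posTable r) (r.length : Int) c)).values ≠ [] :=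
      List.ne_nil_of_mem hyv
    obtain ⟨m, hm⟩ : ∃ m, PySem.List.max?
        (PySem.Dict.counter (shiftList (posTable r) (r.length : Int) c)).values (fun y => y) = some m := by
      cases hmax : PySem.List.max?
          (PySem.Dict.counter (shiftList (posTable r) (r.length : Int) c)).values (fun y => y) with
      | none => exact absurd ((PySem.List.max?_eq_none_iff _ _).mp hmax) hvne
      | some m => exact ⟨m, rfl⟩
    rw [hm, Option.getD_some]
    have hmmem := PySem.List.max?_mem hm
    obtain ⟨k, hk, hkm⟩ := (mem_values_counter _ _).mp hmmem
    constructor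
    · intro h
      obtain ⟨hk0, hkn⟩ := mem_shiftList_range r c hn k hk
      refine ⟨k.toNat, by omega, ?_⟩
      have hke : ((k.toNat : Nat) : Int) = k := Int.toNat_of_nonneg hk0
      have hkc := hcount k.toNat (by omega)
      rw [hke] at hkc
      rw [hkc] at hkm
      omega
    · rintro ⟨sN, hsN, hP⟩
      by_cases hz : matchCnt r c sN = 0
      · have hm0 : (0 : Int) ≤ m := by rw [hkm]; positivity
        omega
      · have hcnt := hcount sN hsN
        have hmem : ((sN : Nat) : Int) ∈ shiftList (posTable r) (r.length : Int) c := by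
          rw [← List.count_pos_iff, hcnt]
          omega
        have hv : ((matchCnt r c sN : Nat) : Int)
            ∈ (PySem.Dict.counter (shiftList (posTable r) (r.length : Int) c)).values := by
          refine (mem_values_counter _ _).mpr ⟨((sN : Nat) : Int), hmem, ?_⟩
          rw [hcnt]
        have hle := PySem.List.max?_isMax hm _ hv
        simp only at hle
        omega

theorem ind_eq (r c : List Char) (hlen : c.length = r.length) : indA r c = indB r c := by
  unfold indA indB
  by_cases hrc : r = c
  · rw [if_pos hrc, if_pos hrc.symm]
  · rw [if_neg hrc, if_neg (show ¬ c = r from fun h => hrc h.symm), similarACTGCount_eq, zipsum_eq]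
    by_cases hgap : pvGapACTG r c < 7
    · rw [if_pos (by simpa using hgap), if_neg (not_le.mpr hgap)]
      have hn : 0 < r.length := by
        rcases Nat.eq_zero_or_pos r.length with h0 | h
        · exact absurd (by rw [List.eq_nil_of_length_eq_zero h0,
            List.eq_nil_of_length_eq_zero (by omega : c.length = 0)]) hrc
        · exact h
      have hr : r ≠ [] := List.ne_nil_of_length_pos hn
      rw [if_neg (show ¬ r.length = 0 by omega), if_pos hlen]
      have hiff : attemptSubstitutions r c = true
          ↔ ((if (PySem.Dict.counter (shiftList (posTable r) (r.length : Int) c)).size ≠ 0 then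
              (PySem.List.max? (PySem.Dict.counter (shiftList (posTable r) (r.length : Int) c)).values (fun y => y)).getD 0
            else 0) + 3 ≥ (r.length : Int)) := by
        rw [attemptSubstitutions_iff r c hn, best_iff r c hn hlen]
        constructor
        · rintro ⟨m, hm, hsim⟩
          rw [stringSimilarities_rot r c hr hlen (m + 1), matchCnt_mod r c hr (m + 1)] at hsim
          exact (exists_bridge r.length hn
            (fun s => (matchCnt r c s : Int) + 3 ≥ (r.length : Int))).mp ⟨m, hm, hsim⟩
        · intro hex
          obtain ⟨m, hm, hP⟩ := (exists_bridge r.length hn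
            (fun s => (matchCnt r c s : Int) + 3 ≥ (r.length : Int))).mpr hex
          exact ⟨m, hm, by
            rw [stringSimilarities_rot r c hr hlen (m + 1), matchCnt_mod r c hr (m + 1)]
            exact hP⟩
      by_cases hA : attemptSubstitutions r c = true
      · rw [if_pos hA, if_pos (hiff.mp hA)]
      · rw [if_neg hA, if_neg (fun h => hA (hiff.mpr h))]
    · rw [if_neg (by simpa using hgap), if_pos (not_lt.mp hgap)]

theorem ind_diff_A (r c : List Char) (hlen : c.length ≠ r.length) :
    indA r c = if pvGapACTG r c < 7 ∧ 1 ≤ r.length ∧ r.length ≤ 3 then 1 else 0 := by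
  unfold indA
  have hrc : ¬ r = c := fun h => hlen (by rw [h])
  rw [if_neg hrc, similarACTGCount_eq]
  by_cases hgap : pvGapACTG r c < 7
  · rw [if_pos (by simpa using hgap)]
    rcases Nat.eq_zero_or_pos r.length with h0 | hn
    · have hfalse : attemptSubstitutions r c = false := by
        unfold attemptSubstitutions
        simp only [h0, Nat.cast_zero]
        rfl
      rw [hfalse,
        if_neg (show ¬ (pvGapACTG r c < 7 ∧ 1 ≤ r.length ∧ r.length ≤ 3) by
          rintro ⟨_, h1, _⟩; omega)]
      simp
    · have hr : r ≠ [] := List.ne_nil_of_length_pos hn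
      by_cases h3 : r.length ≤ 3
      · have hA : attemptSubstitutions r c = true := by
          rw [attemptSubstitutions_iff r c hn]
          refine ⟨0, hn, ?_⟩
          rw [simil_ne_len r c hr hlen 1]
          omega
        rw [if_pos hA, if_pos ⟨hgap, hn, h3⟩]
      · have hA : ¬ attemptSubstitutions r c = true := by
          rw [attemptSubstitutions_iff r c hn]
          rintro ⟨m, hm, hsim⟩
          rw [simil_ne_len r c hr hlen (m + 1)] at hsim
          omega
        rw [if_neg hA, if_neg (by rintro ⟨_, _, h⟩; exact h3 h)]
  · rw [if_neg (by simpa using hgap), if_neg (by rintro ⟨h, _, _⟩; exact hgap h)]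

theorem ind_diff (r c : List Char) (hlen : c.length ≠ r.length) : indA r c = indB r c := by
  rw [ind_diff_A r c hlen]
  unfold indB
  have hrc : ¬ c = r := fun h => hlen (by rw [h])
  rw [if_neg hrc, zipsum_eq]
  by_cases hgap : pvGapACTG r c < 7
  · rw [if_neg (not_le.mpr hgap)]
    by_cases h0 : r.length = 0
    · rw [if_pos h0, if_neg (by rintro ⟨-, h1, -⟩; omega)]
    · rw [if_neg h0, if_neg hlen]
      have hsz : ¬ ((PySem.Dict.counter ([] : List Int)).size ≠ 0) := by decide
      rw [if_neg hsz]
      by_cases h3 : r.length ≤ 3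
      · rw [if_pos (show (0 : Int) + 3 ≥ (r.length : Int) by
            have : (r.length : Int) ≤ 3 := by exact_mod_cast h3
            omega), if_pos ⟨hgap, by omega, h3⟩]
      · rw [if_neg (show ¬ ((0 : Int) + 3 ≥ (r.length : Int)) by
            have : (3 : Int) < (r.length : Int) := by exact_mod_cast Nat.lt_of_not_le h3
            omega), if_neg (by rintro ⟨-, -, h⟩; exact h3 h)]
  · rw [if_pos (not_lt.mp hgap), if_neg (by rintro ⟨h, -, -⟩; exact hgap h)]

-- ===== VERDICT (by name: the statement is the Claim_ definition above) =====
theorem similarDNA_spec : Claim_equal_similarDNA := by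
  intro reference candidates _
  unfold Spec_similarDNA
  rw [similarDNA_eq_sum, similarDNA_alt_eq_sum]
  refine congrArg List.sum (List.map_congr_left ?_)
  intro c _
  by_cases hlen : c.toList.length = reference.toList.length
  · exact ind_eq _ _ hlen
  · exact ind_diff _ _ hlen
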